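-- pv_equiv track=rewrite | github.com/PeterDeWeirdt/gpp-guide-design | utils/featurization/__init__.py | get_cas9_pam_n
-- ===== SOURCE A (Python) =====
-- def get_cas9_pam_n(dict, context_sequence, nts):
--     for nt1 in nts:
--         for nt2 in nts:
--             motif = nt1 + 'G' + 'G' + nt2
--             if context_sequence[24:28] == motif:
--                 dict['20' + motif] = 1
--             else:
--                 dict['20' + motif] = 0
--     return dict
-- ===== SOURCE B (Python) =====
-- def get_cas9_pam_n(dict, context_sequence, nts):
--     # Stage 1: zero-fill every PAM-motif key (same insertion order as A's loops).
--     for nt1 in nts: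
--         for nt2 in nts:
--             dict['20' + nt1 + 'GG' + nt2] = 0
--     # Stage 2: all matching pairs share the single key '20' + match, so instead of
--     # comparing each motif, scan the window once for a 'GG' split whose prefix and
--     # suffix are both nucleotide tokens, and promote that one key to 1.
--     match = context_sequence[24:28]
--     nt_set = set(nts)
--     if any(match[i:i + 2] == 'GG' and match[:i] in nt_set and match[i + 2:] in nt_set
--            for i in range(len(match) - 1)):
--         dict['20' + match] = 1
--     return dict
-- ===== Notes on version B (the rewrite author's own statement) =====
-- stated objective: alternative
-- what changed: B replaces A's per-pair motif-equality scan by two stages: a zero-fill of all keys, then one scan of the window context_sequence[24:28] for a 'GG' split whose prefix and suffix lie in set(nts), which promotes the single shared key '20'+window to 1; no motif is ever compared pair by pair.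
import Mathlib
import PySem

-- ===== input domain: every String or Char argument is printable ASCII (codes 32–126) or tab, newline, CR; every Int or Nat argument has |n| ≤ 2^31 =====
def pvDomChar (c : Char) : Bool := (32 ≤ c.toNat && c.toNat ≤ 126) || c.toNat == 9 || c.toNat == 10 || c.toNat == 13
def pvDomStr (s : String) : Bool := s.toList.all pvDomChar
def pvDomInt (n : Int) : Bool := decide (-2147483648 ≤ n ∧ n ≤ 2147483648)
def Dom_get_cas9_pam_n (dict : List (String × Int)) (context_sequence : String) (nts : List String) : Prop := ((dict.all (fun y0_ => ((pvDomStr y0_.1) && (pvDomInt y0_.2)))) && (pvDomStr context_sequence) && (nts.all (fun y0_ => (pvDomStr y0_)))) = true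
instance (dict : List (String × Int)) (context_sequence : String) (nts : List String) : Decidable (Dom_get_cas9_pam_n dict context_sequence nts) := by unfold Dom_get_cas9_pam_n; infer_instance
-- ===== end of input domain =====

-- B replaces the per-pair motif comparison by a zero-fill of all keys followed by one scan of
-- the window context_sequence[24:28] for a 'GG' split with both parts in set(nts), which sets
-- the single key '20'+window to 1. Return-value equivalence; both Pythons also mutate `dict`
-- identically in place.

-- ===== PORT A =====
def get_cas9_pam_n (dict : List (String × Int)) (context_sequence : String) (nts : List String) : List (String × Int) :=
  (nts.foldl (fun d nt1 =>
    nts.foldl (fun d nt2 =>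
      let motif := nt1.toList ++ ['G'] ++ ['G'] ++ nt2.toList
      if PySem.List.slice context_sequence.toList (some 24) (some 28) = motif then
        d.insert (String.ofList (['2', '0'] ++ motif)) 1
      else
        d.insert (String.ofList (['2', '0'] ++ motif)) 0) d)
    (PySem.Dict.ofList dict)).items

-- ===== PORT B =====
def get_cas9_pam_n_alt (dict : List (String × Int)) (context_sequence : String) (nts : List String) : List (String × Int) :=
  let d1 := nts.foldl (fun d nt1 =>
    nts.foldl (fun d nt2 =>
      d.insert (String.ofList (['2', '0'] ++ nt1.toList ++ ['G', 'G'] ++ nt2.toList)) 0) d)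
    (PySem.Dict.ofList dict)
  let m := PySem.List.slice context_sequence.toList (some 24) (some 28)
  let ntSet : PySem.Set String := PySem.Set.ofList nts
  if (PySem.List.pyRange 0 ((m.length : Int) - 1) 1).any (fun i =>
        decide (PySem.List.slice m (some i) (some (i + 2)) = ['G', 'G']) &&
        ntSet.contains (String.ofList (PySem.List.slice m none (some i))) &&
        ntSet.contains (String.ofList (PySem.List.slice m (some (i + 2)) none)))
  then (d1.insert (String.ofList (['2', '0'] ++ m)) 1).items
  else d1.items

-- ===== PRECONDITION & SPEC =====
def Spec_get_cas9_pam_n (dict : List (String × Int)) (context_sequence : String) (nts : List String) (out : List (String × Int)) : Prop := out = get_cas9_pam_n_alt dict context_sequence nts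
instance (dict : List (String × Int)) (context_sequence : String) (nts : List String) (out : List (String × Int)) : Decidable (Spec_get_cas9_pam_n dict context_sequence nts out) := by unfold Spec_get_cas9_pam_n; infer_instance

-- ===== CLAIM (what is proved, stated in full; the proofs are below) =====
def Claim_equal_get_cas9_pam_n : Prop := ∀ (dict : List (String × Int)) (context_sequence : String) (nts : List String), Dom_get_cas9_pam_n dict context_sequence nts → Spec_get_cas9_pam_n dict context_sequence nts (get_cas9_pam_n dict context_sequence nts)

-- ===== LEMMAS AND PROOFS =====

-- proof-side vocabulary
def pvMotif (p : String × String) : List Char := p.1.toList ++ ['G', 'G'] ++ p.2.toList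
def pvKey (m : List Char) : String := String.ofList (['2', '0'] ++ m)
def pvStepA (m : List Char) (d : PySem.Dict String Int) (p : String × String) : PySem.Dict String Int :=
  d.insert (pvKey (pvMotif p)) (if m = pvMotif p then 1 else 0)
def pvStepZ (d : PySem.Dict String Int) (p : String × String) : PySem.Dict String Int :=
  d.insert (pvKey (pvMotif p)) 0
def pvPairs (nts : List String) : List (String × String) :=
  nts.flatMap (fun a => nts.map (fun b => (a, b)))

theorem pv_key_inj {m m' : List Char} (h : pvKey m = pvKey m') : m = m' := by
  have := congrArg String.toList h
  simpa [pvKey] using this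

-- Dict internals: an in-place overwrite keeps the keys, a fresh key appends
theorem pv_insert_items_pos {κ ν : Type} [BEq κ] (d : PySem.Dict κ ν) (k : κ) (v : ν)
    (hc : d.contains k = true) :
    (d.insert k v).items = d.items.map (fun p => if p.1 == k then (k, v) else p) := by
  unfold PySem.Dict.insert
  rw [if_pos hc]

theorem pv_insert_items_neg {κ ν : Type} [BEq κ] (d : PySem.Dict κ ν) (k : κ) (v : ν)
    (hc : ¬ d.contains k = true) :
    (d.insert k v).items = d.items ++ [(k, v)] := by
  unfold PySem.Dict.insert
  rw [if_neg hc]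

theorem pv_any_map_key {κ ν : Type} [BEq κ] [LawfulBEq κ] (l : List (κ × ν)) (kk : κ) (vv : ν)
    (x : κ) :
    ((l.map (fun p => if p.1 == kk then (kk, vv) else p)).any (fun p => p.1 == x))
      = l.any (fun p => p.1 == x) := by
  induction l with
  | nil => rfl
  | cons p t ih => by_cases h : p.1 = kk <;> simp [h, ih]

theorem pv_contains_insert_eq {κ ν : Type} [BEq κ] [LawfulBEq κ] (d : PySem.Dict κ ν)
    (kk : κ) (vv : ν) (x : κ) :
    (d.insert kk vv).contains x = (d.contains x || kk == x) := by
  by_cases hc : d.contains kk = true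
  · simp only [PySem.Dict.contains, pv_insert_items_pos d kk vv hc, pv_any_map_key]
    by_cases hx : kk = x
    · subst hx
      simp only [PySem.Dict.contains] at hc
      simp [hc]
    · simp [hx]
  · simp only [PySem.Dict.contains, pv_insert_items_neg d kk vv hc]
    simp [List.any_append]

theorem pv_contains_insert {κ ν : Type} [BEq κ] [LawfulBEq κ] (d : PySem.Dict κ ν)
    (k k' : κ) (v : ν) (hc : d.contains k = true) :
    (d.insert k' v).contains k = true := by
  rw [pv_contains_insert_eq]
  simp [hc]

theorem pv_contains_insert_self {κ ν : Type} [BEq κ] [LawfulBEq κ] (d : PySem.Dict κ ν)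
    (k : κ) (v : ν) : (d.insert k v).contains k = true := by
  rw [pv_contains_insert_eq]
  simp

-- Dict internals: inserts at distinct keys commute when the first key is already present
theorem pv_insert_comm {κ ν : Type} [BEq κ] [LawfulBEq κ] (d : PySem.Dict κ ν)
    (k k' : κ) (v v' : ν) (hc : d.contains k = true) (hne : k' ≠ k) :
    (d.insert k v).insert k' v' = (d.insert k' v').insert k v := by
  apply PySem.Dict.ext
  have e1 := pv_insert_items_pos d k v hc
  by_cases hc' : d.contains k' = true
  · have e2 := pv_insert_items_pos d k' v' hc'
    have c1 : (d.insert k v).contains k' = true := by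
      rw [pv_contains_insert_eq]; simp [hc']
    have c2 : (d.insert k' v').contains k = true := by
      rw [pv_contains_insert_eq]; simp [hc]
    rw [pv_insert_items_pos _ k' v' c1, pv_insert_items_pos _ k v c2, e1, e2,
      List.map_map, List.map_map]
    apply List.map_congr_left
    intro p _
    by_cases ha : p.1 = k <;> by_cases hb : p.1 = k'
    · rw [ha] at hb; exact absurd hb.symm hne
    · simp [Function.comp, ha, hb, hne, Ne.symm hne]
    · simp [Function.comp, ha, hb, hne, Ne.symm hne]
    · simp [Function.comp, ha, hb, hne, Ne.symm hne]
  · have e2 := pv_insert_items_neg d k' v' hc'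
    have c1 : ¬ (d.insert k v).contains k' = true := by
      rw [pv_contains_insert_eq]
      simp only [Bool.or_eq_true, beq_iff_eq]
      rintro (h | h)
      · exact hc' h
      · exact hne h.symm
    have c2 : (d.insert k' v').contains k = true := by
      rw [pv_contains_insert_eq]; simp [hc]
    rw [pv_insert_items_neg _ k' v' c1, pv_insert_items_pos _ k v c2, e1, e2,
      List.map_append]
    have hkk : (k' == k) = false := by simp [hne]
    congr 1
    simp [hkk]

theorem pv_V (m : List Char) (L : List (String × String)) :
    ∀ d : PySem.Dict String Int, d.contains (pvKey m) = true →
      L.foldl (pvStepA m) (d.insert (pvKey m) 1)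
        = (L.foldl pvStepZ d).insert (pvKey m) 1 := by
  induction L with
  | nil => intro d _; rfl
  | cons p L ih =>
    intro d hc
    by_cases hp : pvMotif p = m
    · have hk : pvKey (pvMotif p) = pvKey m := by rw [hp]
      have hv : (if m = pvMotif p then (1 : Int) else 0) = 1 := if_pos hp.symm
      simp only [List.foldl_cons, pvStepA, pvStepZ, hk, hv]
      rw [PySem.Dict.insert_insert_self]
      have h01 : d.insert (pvKey m) 1 = (d.insert (pvKey m) 0).insert (pvKey m) 1 :=
        (PySem.Dict.insert_insert_self d (pvKey m) 0 1).symm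
      rw [h01, ih _ (pv_contains_insert_self (d.insert (pvKey m) 0) (pvKey m) 1 ▸
        pv_contains_insert_self d (pvKey m) 0)]
    · have hk : pvKey (pvMotif p) ≠ pvKey m := fun h => hp (pv_key_inj h)
      have hv : (if m = pvMotif p then (1 : Int) else 0) = 0 :=
        if_neg (fun h => hp h.symm)
      simp only [List.foldl_cons, pvStepA, pvStepZ, hv]
      rw [pv_insert_comm d (pvKey m) (pvKey (pvMotif p)) 1 0 hc hk]
      exact ih _ (pv_contains_insert d (pvKey m) (pvKey (pvMotif p)) 0 hc)

theorem pv_main (m : List Char) (L : List (String × String)) :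
    ∀ d : PySem.Dict String Int,
      L.foldl (pvStepA m) d
        = if L.any (fun p => decide (pvMotif p = m))
          then (L.foldl pvStepZ d).insert (pvKey m) 1
          else L.foldl pvStepZ d := by
  induction L with
  | nil => intro d; simp
  | cons p L ih =>
    intro d
    by_cases hp : pvMotif p = m
    · have hk : pvKey (pvMotif p) = pvKey m := by rw [hp]
      have hv : (if m = pvMotif p then (1 : Int) else 0) = 1 := if_pos hp.symm
      have hany : ((p :: L).any (fun p => decide (pvMotif p = m))) = true := by
        simp [hp]
      rw [hany, if_pos rfl]
      simp only [List.foldl_cons, pvStepA, pvStepZ, hk, hv]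
      have h01 : d.insert (pvKey m) 1 = (d.insert (pvKey m) 0).insert (pvKey m) 1 :=
        (PySem.Dict.insert_insert_self d (pvKey m) 0 1).symm
      rw [h01, pv_V m L _ (pv_contains_insert_self d (pvKey m) 0)]
    · have hv : (if m = pvMotif p then (1 : Int) else 0) = 0 :=
        if_neg (fun h => hp h.symm)
      have hany : ((p :: L).any (fun q => decide (pvMotif q = m)))
          = (L.any (fun q => decide (pvMotif q = m))) := by
        simp [hp]
      rw [hany]
      simp only [List.foldl_cons, pvStepA, pvStepZ, hv]
      exact ih _

theorem pv_nested (L1 L2 : List String)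
    (g : PySem.Dict String Int → String × String → PySem.Dict String Int) :
    ∀ d0, L1.foldl (fun d a => L2.foldl (fun d b => g d (a, b)) d) d0
      = (L1.flatMap (fun a => L2.map (fun b => (a, b)))).foldl g d0 := by
  induction L1 with
  | nil => intro d0; rfl
  | cons a L1 ih =>
    intro d0
    simp only [List.foldl_cons, List.flatMap_cons, List.foldl_append, List.foldl_map, ih]

-- m = a ++ 'G'::'G'::b  ⟺  the decomposed slice tests on m.
theorem pv_motif_split (m a b : List Char) :
    (m = a ++ ['G', 'G'] ++ b) ↔
      (m.take a.length = a ∧ (m.drop a.length).take 2 = ['G', 'G'] ∧ b = m.drop (a.length + 2)) := by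
  constructor
  · rintro rfl
    refine ⟨?_, ?_, ?_⟩ <;> simp [List.drop_append]
  · rintro ⟨h1, h2, h3⟩
    have hm : m = m.take a.length ++ (m.drop a.length).take 2 ++ ((m.drop a.length).drop 2) := by
      simp [List.take_append_drop]
    rw [h3]
    conv_lhs => rw [hm]
    rw [h1, h2, List.drop_drop]

theorem pv_cond (m : List Char) (nts : List String) :
    ((PySem.List.pyRange 0 ((m.length : Int) - 1) 1).any (fun i =>
        decide (PySem.List.slice m (some i) (some (i + 2)) = ['G', 'G']) &&
        ((PySem.Set.ofList nts).contains (String.ofList (PySem.List.slice m none (some i)))) &&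
        ((PySem.Set.ofList nts).contains (String.ofList (PySem.List.slice m (some (i + 2)) none)))) = true)
      ↔ ∃ p ∈ pvPairs nts, pvMotif p = m := by
  constructor
  · intro h
    rcases List.any_eq_true.1 h with ⟨i, hi, htest⟩
    rcases (PySem.List.mem_pyRange_one).1 hi with ⟨h0, h1⟩
    have hjlt : i.toNat + 1 < m.length := by omega
    have hs1 : PySem.List.slice m (some i) (some (i + 2)) = (m.drop i.toNat).take 2 := by
      rw [PySem.List.slice_toNat m h0 (by omega)]
      congr 1 <;> omega
    have hs2 : PySem.List.slice m none (some i) = m.take i.toNat :=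
      PySem.List.slice_to m h0
    have hs3 : PySem.List.slice m (some (i + 2)) none = m.drop (i.toNat + 2) := by
      rw [PySem.List.slice_from m (by omega)]
      congr 1 <;> omega
    rw [hs1, hs2, hs3] at htest
    simp only [Bool.and_eq_true, decide_eq_true_eq, List.contains_iff_mem] at htest
    obtain ⟨⟨hgg, hmem1⟩, hmem2⟩ := htest
    have hmem1' : String.ofList (m.take i.toNat) ∈ nts :=
      (PySem.Set.mem_ofList nts _).1 (List.contains_iff_mem.1 hmem1)
    have hmem2' : String.ofList (m.drop (i.toNat + 2)) ∈ nts :=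
      (PySem.Set.mem_ofList nts _).1 (List.contains_iff_mem.1 hmem2)
    refine ⟨(String.ofList (m.take i.toNat), String.ofList (m.drop (i.toNat + 2))), ?_, ?_⟩
    · simp only [pvPairs, List.mem_flatMap]
      exact ⟨_, hmem1', List.mem_map_of_mem hmem2'⟩
    · have hlen : (m.take i.toNat).length = i.toNat := by
        rw [List.length_take]
        omega
      have hsplit := (pv_motif_split m (m.take i.toNat) (m.drop (i.toNat + 2))).2
        ⟨by rw [hlen],
         by rw [hlen]; exact hgg,
         by rw [hlen]⟩
      simpa [pvMotif] using hsplit.symm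
  · rintro ⟨p, hp, hm⟩
    rcases List.mem_flatMap.1 hp with ⟨a, ha, hb⟩
    rcases List.mem_map.1 hb with ⟨b, hbmem, hpe⟩
    subst hpe
    simp only [pvMotif] at hm
    have hm' := hm.symm
    rcases (pv_motif_split m a.toList b.toList).1 hm' with ⟨ht1, ht2, ht3⟩
    have hlen : m.length = a.toList.length + 2 + b.toList.length := by
      rw [hm']
      simp [List.length_append]
      omega
    refine List.any_eq_true.2 ⟨(a.toList.length : Int), ?_, ?_⟩
    · rw [PySem.List.mem_pyRange_one]
      omega
    · have h0 : (0 : Int) ≤ (a.toList.length : Int) := by omega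
      have hs1 : PySem.List.slice m (some (a.toList.length : Int))
          (some ((a.toList.length : Int) + 2)) = (m.drop a.toList.length).take 2 := by
        rw [PySem.List.slice_toNat m h0 (by omega)]
        congr 1 <;> omega
      have hs2 : PySem.List.slice m none (some (a.toList.length : Int))
          = m.take a.toList.length := by
        rw [PySem.List.slice_to m h0]
        congr 1
      have hs3 : PySem.List.slice m (some ((a.toList.length : Int) + 2)) none
          = m.drop (a.toList.length + 2) := by
        rw [PySem.List.slice_from m (by omega)]
        congr 1
      rw [hs1, hs2, hs3, ht1, ht2, ← ht3]
      have hsa : String.ofList a.toList = a := by simp [String.ofList_toList]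
      have hsb : String.ofList b.toList = b := by simp [String.ofList_toList]
      rw [hsa, hsb]
      simp only [Bool.and_eq_true, decide_eq_true_eq, List.contains_iff_mem]
      refine ⟨⟨trivial, ?_⟩, ?_⟩
      · exact List.contains_iff_mem.2 ((PySem.Set.mem_ofList nts a).2 ha)
      · exact List.contains_iff_mem.2 ((PySem.Set.mem_ofList nts b).2 hbmem)

-- ===== VERDICT (by name: the statement is the Claim_ definition above) =====
theorem get_cas9_pam_n_spec : Claim_equal_get_cas9_pam_n := by
  intro dict context_sequence nts _
  unfold Spec_get_cas9_pam_n get_cas9_pam_n get_cas9_pam_n_alt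
  have hA : nts.foldl (fun d nt1 =>
      nts.foldl (fun d nt2 =>
        let motif := nt1.toList ++ ['G'] ++ ['G'] ++ nt2.toList
        if PySem.List.slice context_sequence.toList (some 24) (some 28) = motif then
          d.insert (String.ofList (['2', '0'] ++ motif)) 1
        else
          d.insert (String.ofList (['2', '0'] ++ motif)) 0) d)
      (PySem.Dict.ofList dict)
      = (pvPairs nts).foldl
          (pvStepA (PySem.List.slice context_sequence.toList (some 24) (some 28)))
          (PySem.Dict.ofList dict) := by
    unfold pvPairs
    rw [← pv_nested nts nts
      (pvStepA (PySem.List.slice context_sequence.toList (some 24) (some 28)))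
      (PySem.Dict.ofList dict)]
    apply PySem.List.foldl_congr_mem
    intro d a _
    apply PySem.List.foldl_congr_mem
    intro d' b _
    show (if PySem.List.slice context_sequence.toList (some 24) (some 28)
            = a.toList ++ ['G'] ++ ['G'] ++ b.toList then
        d'.insert (String.ofList (['2', '0'] ++ (a.toList ++ ['G'] ++ ['G'] ++ b.toList))) 1
      else
        d'.insert (String.ofList (['2', '0'] ++ (a.toList ++ ['G'] ++ ['G'] ++ b.toList))) 0)
      = pvStepA (PySem.List.slice context_sequence.toList (some 24) (some 28)) d' (a, b)
    have hmot : a.toList ++ ['G'] ++ ['G'] ++ b.toList = pvMotif (a, b) := by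
      simp [pvMotif]
    rw [hmot]
    unfold pvStepA
    split_ifs <;> rfl
  have hB : nts.foldl (fun d nt1 =>
      nts.foldl (fun d nt2 =>
        d.insert (String.ofList (['2', '0'] ++ nt1.toList ++ ['G', 'G'] ++ nt2.toList)) 0) d)
      (PySem.Dict.ofList dict)
      = (pvPairs nts).foldl pvStepZ (PySem.Dict.ofList dict) := by
    unfold pvPairs
    rw [← pv_nested nts nts pvStepZ (PySem.Dict.ofList dict)]
    apply PySem.List.foldl_congr_mem
    intro d a _
    apply PySem.List.foldl_congr_mem
    intro d' b _
    show d'.insert (String.ofList (['2', '0'] ++ a.toList ++ ['G', 'G'] ++ b.toList)) 0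
      = pvStepZ d' (a, b)
    unfold pvStepZ pvKey pvMotif
    simp [List.append_assoc]
  rw [hA, hB, pv_main (PySem.List.slice context_sequence.toList (some 24) (some 28))
    (pvPairs nts) (PySem.Dict.ofList dict)]
  by_cases hc : ∃ p ∈ pvPairs nts,
      pvMotif p = PySem.List.slice context_sequence.toList (some 24) (some 28)
  · have hb : ((pvPairs nts).any fun p =>
        decide (pvMotif p = PySem.List.slice context_sequence.toList (some 24) (some 28))) = true := by
      rcases hc with ⟨p, hp, he⟩
      exact List.any_eq_true.2 ⟨p, hp, decide_eq_true he⟩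
    rw [hb, if_pos rfl,
      if_pos ((pv_cond (PySem.List.slice context_sequence.toList (some 24) (some 28)) nts).2 hc)]
    rfl
  · have hb : ((pvPairs nts).any fun p =>
        decide (pvMotif p = PySem.List.slice context_sequence.toList (some 24) (some 28))) = false := by
      simp only [List.any_eq_false]
      intro p hp
      exact fun he => hc ⟨p, hp, of_decide_eq_true he⟩
    rw [hb, if_neg (by simp),
      if_neg (fun h => hc ((pv_cond (PySem.List.slice context_sequence.toList (some 24) (some 28)) nts).1 h))]
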